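-- pv_equiv track=rewrite | github.com/wndudwkd003/pdm_2025 | src/utils/feature_name.py | expand_feature_names
-- ===== SOURCE A (Python) =====
-- from typing import Sequence, List
--
-- def expand_feature_names(
--     sensors: Sequence[str],
--     T: int,
--     append_mask: bool
-- ) -> List[str]:
--     names = [f"{s}_t{t:02d}" for t in range(T) for s in sensors]      # 값 구간 (길이 F*T)
--     if append_mask:
--         names += [f"{s}_t{t:02d}_m" for t in range(T) for s in sensors] # 마스크 구간 (길이 F*T)
--     return names
-- ===== SOURCE B (Python) =====
-- def expand_feature_names(sensors, T, append_mask):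
--     F = len(sensors)
--     block = F * max(T, 0)
--     total = 2 * block if append_mask else block
--     out = [None] * total          # output size is known up front
--     for k in range(total):
--         j = k % block             # position within a block (k < block: value part, else mask part)
--         t, i = divmod(j, F)       # F > 0 whenever the loop runs
--         name = f"{sensors[i]}_t{t:02d}"
--         out[k] = name if k < block else name + "_m"
--     return out
-- ===== Notes on version B (the rewrite author's own statement) =====
-- stated objective: alternative
-- what changed: B replaces A's two nested (t, sensor) comprehensions by one flat loop over the total index range, recovering the block (value/mask), time step and sensor of each position by divmod index arithmetic.
import Mathlib
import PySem

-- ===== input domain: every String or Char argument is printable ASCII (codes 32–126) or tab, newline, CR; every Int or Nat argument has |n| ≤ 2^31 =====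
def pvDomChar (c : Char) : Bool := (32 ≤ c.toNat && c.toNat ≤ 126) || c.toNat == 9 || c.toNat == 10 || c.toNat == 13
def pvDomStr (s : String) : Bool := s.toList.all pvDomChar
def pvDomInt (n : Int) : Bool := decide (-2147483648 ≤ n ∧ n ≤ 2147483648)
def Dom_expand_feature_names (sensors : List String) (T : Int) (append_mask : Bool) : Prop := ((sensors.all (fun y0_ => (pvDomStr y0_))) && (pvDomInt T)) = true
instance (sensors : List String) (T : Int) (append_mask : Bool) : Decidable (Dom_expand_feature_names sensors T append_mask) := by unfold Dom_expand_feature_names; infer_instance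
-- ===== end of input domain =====

-- B generates all names in one flat indexed loop (k -> block/t/sensor by divmod) instead of A's two nested (t, sensor) comprehensions; objective: alternative algorithm, same cost.


-- ===== PORT A =====
-- f"{t:02d}": zero-pad to width 2; exact for the values reached here (pads only 0 ≤ t < 10)
def pvPad2 (t : Int) : String :=
  if 0 ≤ t ∧ t < 10 then "0" ++ PySem.Int.toStr t else PySem.Int.toStr t

def expand_feature_names (sensors : List String) (T : Int) (append_mask : Bool) : List String :=
  let names := (PySem.List.pyRange 0 T 1).flatMap (fun t => sensors.map (fun s => s ++ "_t" ++ pvPad2 t))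
  if append_mask then
    names ++ (PySem.List.pyRange 0 T 1).flatMap (fun t => sensors.map (fun s => s ++ "_t" ++ pvPad2 t ++ "_m"))
  else names

-- ===== PORT B =====
def expand_feature_names_alt (sensors : List String) (T : Int) (append_mask : Bool) : List String :=
  let F : Int := sensors.length
  let block : Int := F * max T 0
  let total : Int := if append_mask then 2 * block else block
  (PySem.List.pyRange 0 total 1).map (fun k =>
    let j := PySem.Int.mod k block            -- position within a block
    let t := PySem.Int.floordiv j F           -- divmod(j, F); F > 0 whenever the loop runs
    let i := PySem.Int.mod j F
    let name := (PySem.List.pyGet? sensors i).getD "" ++ "_t" ++ pvPad2 t  -- index always in range here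
    if k < block then name else name ++ "_m")

-- ===== PRECONDITION & SPEC =====
def Spec_expand_feature_names (sensors : List String) (T : Int) (append_mask : Bool) (out : List String) : Prop := out = expand_feature_names_alt sensors T append_mask
instance (sensors : List String) (T : Int) (append_mask : Bool) (out : List String) : Decidable (Spec_expand_feature_names sensors T append_mask out) := by unfold Spec_expand_feature_names; infer_instance

-- ===== CLAIM (what is proved, stated in full; the proofs are below) =====
def Claim_equal_expand_feature_names : Prop := ∀ (sensors : List String) (T : Int) (append_mask : Bool), Dom_expand_feature_names sensors T append_mask → Spec_expand_feature_names sensors T append_mask (expand_feature_names sensors T append_mask)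

-- ===== LEMMAS AND PROOFS =====

-- mapping f over xs = mapping f ∘ (getD · d) over the index range
theorem pv_map_range_getD {α β : Type} (xs : List α) (d : α) (f : α → β) :
    (List.range xs.length).map (fun i => f (xs.getD i d)) = xs.map f := by
  induction xs with
  | nil => simp
  | cons x xs ih =>
    simp only [List.length_cons, List.range_succ_eq_map, List.map_cons, List.map_map,
      Function.comp_def, List.getD_cons_zero, List.getD_cons_succ, List.map_cons]
    exact congrArg _ ih

-- flattening a (t, i) grid traversal into a single divmod-indexed range
theorem pv_grid (F Tn : Nat) (g : Nat → Nat → String) :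
    (List.range (F * Tn)).map (fun j => g (j / F) (j % F))
      = (List.range Tn).flatMap (fun t => (List.range F).map (fun i => g t i)) := by
  induction Tn with
  | zero => simp
  | succ n ih =>
    rw [Nat.mul_succ, List.range_add, List.map_append, List.map_map, ih, List.range_succ,
      List.flatMap_append]
    simp only [List.flatMap_cons, List.flatMap_nil, List.append_nil]
    congr 1
    refine List.map_congr_left ?_
    intro i hi
    simp only [List.mem_range] at hi
    have hF : 0 < F := by omega
    have h1 : (F * n + i) / F = n := by
      rw [Nat.mul_add_div hF, Nat.div_eq_of_lt hi, Nat.add_zero]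
    have h2 : (F * n + i) % F = i := by
      rw [Nat.mul_add_mod, Nat.mod_eq_of_lt hi]
    simp [h1, h2]

-- ===== VERDICT (by name: the statement is the Claim_ definition above) =====
theorem expand_feature_names_spec : Claim_equal_expand_feature_names := by
  intro sensors T append_mask _
  unfold Spec_expand_feature_names expand_feature_names expand_feature_names_alt
  have hmax : (sensors.length : Int) * max T 0 = ((sensors.length * T.toNat : Nat) : Int) := by
    rw [← Int.ofNat_toNat T]; push_cast; ring
  -- the flat-index name function of B, at a Nat index
  set nm : Nat → String := fun j =>
    (PySem.List.pyGet? sensors (PySem.Int.mod (j : Int) (sensors.length : Int))).getD "" ++ "_t"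
      ++ pvPad2 (PySem.Int.floordiv (j : Int) (sensors.length : Int)) with hnmdef
  have hnm : ∀ j : Nat, nm j = sensors.getD (j % sensors.length) "" ++ "_t"
      ++ pvPad2 ((j / sensors.length : Nat) : Int) := by
    intro j
    rw [hnmdef]
    simp only [PySem.Int.mod_natCast, PySem.Int.floordiv_natCast, PySem.List.pyGet?_natCast,
      List.getD_eq_getElem?_getD]
  have hbaseA :
      (PySem.List.pyRange 0 T 1).flatMap (fun t => sensors.map (fun s => s ++ "_t" ++ pvPad2 t))
        = (List.range (sensors.length * T.toNat)).map nm := by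
    have h1 : (List.range (sensors.length * T.toNat)).map nm
        = (List.range (sensors.length * T.toNat)).map (fun j =>
            (fun (t i : Nat) => sensors.getD i "" ++ "_t" ++ pvPad2 (t : Int)) (j / sensors.length) (j % sensors.length)) :=
      List.map_congr_left (fun j _ => hnm j)
    rw [h1, pv_grid sensors.length T.toNat (fun (t i : Nat) => sensors.getD i "" ++ "_t" ++ pvPad2 (t : Int)),
      PySem.List.pyRange_one]
    simp only [List.flatMap_map, sub_zero, zero_add]
    congr 1
    funext t
    exact (pv_map_range_getD sensors "" (fun s => s ++ "_t" ++ pvPad2 (t : Int))).symm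
  have hmaskA :
      (PySem.List.pyRange 0 T 1).flatMap (fun t => sensors.map (fun s => s ++ "_t" ++ pvPad2 t ++ "_m"))
        = (List.range (sensors.length * T.toNat)).map (fun j => nm j ++ "_m") := by
    have h1 : (List.range (sensors.length * T.toNat)).map (fun j => nm j ++ "_m")
        = (List.range (sensors.length * T.toNat)).map (fun j =>
            (fun (t i : Nat) => sensors.getD i "" ++ "_t" ++ pvPad2 (t : Int) ++ "_m") (j / sensors.length) (j % sensors.length)) :=
      List.map_congr_left (fun j _ => by rw [hnm j])
    rw [h1, pv_grid sensors.length T.toNat (fun (t i : Nat) => sensors.getD i "" ++ "_t" ++ pvPad2 (t : Int) ++ "_m"),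
      PySem.List.pyRange_one]
    simp only [List.flatMap_map, sub_zero, zero_add]
    congr 1
    funext t
    exact (pv_map_range_getD sensors "" (fun s => s ++ "_t" ++ pvPad2 (t : Int) ++ "_m")).symm
  cases append_mask with
  | false =>
    simp only [Bool.false_eq_true, if_false]
    rw [hbaseA, hmax, PySem.List.pyRange_one]
    simp only [sub_zero, Int.toNat_natCast, List.map_map]
    refine List.map_congr_left ?_
    intro j hj
    simp only [List.mem_range] at hj
    have h1 : PySem.Int.mod ((0:Int) + (j:Int)) ((sensors.length * T.toNat : Nat) : Int) = (j : Int) := by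
      rw [zero_add, PySem.Int.mod_natCast, Nat.mod_eq_of_lt hj]
    have h2 : ((0:Int) + (j:Int)) < ((sensors.length * T.toNat : Nat) : Int) := by push_cast; omega
    simp only [Function.comp_def, h1, if_pos h2, hnmdef]
  | true =>
    have h2b : (2 : Int) * ((sensors.length * T.toNat : Nat) : Int) = ((2 * (sensors.length * T.toNat) : Nat) : Int) := by
      push_cast; ring
    simp only [if_true]
    rw [hbaseA, hmaskA, hmax, h2b, PySem.List.pyRange_one]
    simp only [sub_zero, Int.toNat_natCast, two_mul, List.range_add, List.map_append, List.map_map]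
    congr 1
    · refine List.map_congr_left ?_
      intro j hj
      simp only [List.mem_range] at hj
      have h1 : PySem.Int.mod ((0:Int) + (j:Int)) ((sensors.length * T.toNat : Nat) : Int) = (j : Int) := by
        rw [zero_add, PySem.Int.mod_natCast, Nat.mod_eq_of_lt hj]
      have h2 : ((0:Int) + (j:Int)) < ((sensors.length * T.toNat : Nat) : Int) := by push_cast; omega
      simp only [Function.comp_def, h1, if_pos h2, hnmdef]
    · refine List.map_congr_left ?_
      intro j hj
      simp only [List.mem_range] at hj
      have h1 : PySem.Int.mod ((0:Int) + ((sensors.length * T.toNat + j : Nat) : Int)) ((sensors.length * T.toNat : Nat) : Int) = (j : Int) := by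
        rw [zero_add, PySem.Int.mod_natCast, Nat.add_mod_left, Nat.mod_eq_of_lt hj]
      have h2 : ¬ (((0:Int) + ((sensors.length * T.toNat + j : Nat) : Int)) < ((sensors.length * T.toNat : Nat) : Int)) := by
        push_cast; omega
      simp only [Function.comp_def, h1, if_neg h2, hnmdef]
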